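-- pv_equiv track=rewrite | github.com/aditocco2/EECE590X | 05_Multiple_Gate_Circuits/1_tt_from_circuit/modular_html_tt.py | modular_html_tt
-- ===== SOURCE A (Python) =====
-- def modular_html_tt(s, col_headers):
--     import math
--
--     # Parameter Filtering
--     num_inputs = int(math.log2(len(s)))
--     rows, cols = 2**num_inputs, num_inputs+1  # Table dimensions (Without Labels)
--     if len(s) != rows:
--         return "ERROR - Invalid data string length. Make sure the amount \
--                 of data string characters is a power of 2."
--
--     for char in s:
--         if char != '0' and char != '1' and char != 'X' and char != 'x':
--             return "ERROR - data string contains invalid character. \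
--                     Make sure the string contains only '0', '1', 'x' or 'X'"
--
--     if len(col_headers) != num_inputs:
--         return "ERROR - Invalid quantity of column headers given. Make sure the \
--                 list contains ONE string for each input"
--
--     # Generating input data
--     in_data = []
--     swap = rows
--     for col in range(num_inputs):
--         sublist = []
--         swap = swap/2
--         flag = 1
--         for i in range(rows):
--             if i%swap==0:
--                 flag ^= 1
--             sublist.append(f"{flag}")
--         in_data.append(sublist)
--
--     # Constant Definitions
--     w = 30
--     h = 30
--     ph = w/2
--     pd = w/3
--     border_style = "2px solid black"
--     special_border_style = "4px solid black"
--
--     # Styling for "Zebra Striped" table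
--     table = "<style>tr:nth-child(even) {\nbackground-color: #E6E6E6;\n}\n</style>\n"
--
--     # Table declaration and adding the column labels
--     table += "<table style='border-collapse: collapse;'>\n<tr>\n"
--     for label in col_headers:
--         table += f"    <th style='width: {w}px; height: {h}px; text-align: center; \
--                 padding: {ph}px; border: {border_style};'>{label}</th>\n"
--     table += f"    <th style='width: {w}px; height: {h}px; text-align: center; padding: \
--             {ph}px; border: {border_style}; border-left: {special_border_style};'>Result</th>\n"
--     table += "  </tr>\n"
--
--     # Filling in the table
--     for r in range(rows):
--         table += "  <tr>\n"
--         for col in in_data: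
--             table += f"    <td style='width: {w}px; height: {h}px; text-align: center;\
--                     padding: {pd}px; border: {border_style};'>{col[r]}</td>\n"
--
--         index = r
--         char = s[index] if index < len(s) else "&nbsp;"
--         table += f"    <td style='width: {w}px; height: {h}px; text-align: center; padding: {pd}px; \
--                 border: {border_style}; border-left: {special_border_style};'>{char}</td>\n"
--         table += "  </tr>\n"
--
--     table += "</table><p>\n\n</p>"
--     return table
-- ===== SOURCE B (Python) =====
-- def modular_html_tt(s, col_headers):
--     import math
--
--     num_inputs = int(math.log2(len(s)))
--     rows = 2 ** num_inputs
--     if len(s) != rows: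
--         return 'ERROR - Invalid data string length. Make sure the amount                 of data string characters is a power of 2.'
--     if any(c not in "01Xx" for c in s):
--         return "ERROR - data string contains invalid character.                     Make sure the string contains only '0', '1', 'x' or 'X'"
--     if len(col_headers) != num_inputs:
--         return 'ERROR - Invalid quantity of column headers given. Make sure the                 list contains ONE string for each input'
--
--     TH = "    <th style='width: 30px; height: 30px; text-align: center;                 padding: 15.0px; border: 2px solid black;'>{}</th>\n"
--     TH_RESULT = "    <th style='width: 30px; height: 30px; text-align: center; padding:             15.0px; border: 2px solid black; border-left: 4px solid black;'>Result</th>\n"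
--     TD = "    <td style='width: 30px; height: 30px; text-align: center;                    padding: 10.0px; border: 2px solid black;'>{}</td>\n"
--     TD_RESULT = "    <td style='width: 30px; height: 30px; text-align: center; padding: 10.0px;                 border: 2px solid black; border-left: 4px solid black;'>{}</td>\n"
--
--     head = ("<style>tr:nth-child(even) {\nbackground-color: #E6E6E6;\n}\n</style>\n"
--             "<table style='border-collapse: collapse;'>\n<tr>\n"
--             + "".join(TH.format(label) for label in col_headers)
--             + TH_RESULT + "  </tr>\n")
--     body = "".join(
--         "  <tr>\n"
--         + "".join(TD.format((r >> (num_inputs - 1 - col)) & 1) for col in range(num_inputs))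
--         + TD_RESULT.format(s[r]) + "  </tr>\n"
--         for r in range(rows))
--     return head + body + "</table><p>\n\n</p>"
-- ===== Notes on version B (the rewrite author's own statement) =====
-- stated objective: simpler
-- what changed: B drops A's precomputed in_data bit-pattern table (a toggle-flag loop per column) and computes each cell directly as (r >> (num_inputs-1-col)) & 1, assembling the HTML from joined comprehensions instead of repeated string accumulation.
import Mathlib
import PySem

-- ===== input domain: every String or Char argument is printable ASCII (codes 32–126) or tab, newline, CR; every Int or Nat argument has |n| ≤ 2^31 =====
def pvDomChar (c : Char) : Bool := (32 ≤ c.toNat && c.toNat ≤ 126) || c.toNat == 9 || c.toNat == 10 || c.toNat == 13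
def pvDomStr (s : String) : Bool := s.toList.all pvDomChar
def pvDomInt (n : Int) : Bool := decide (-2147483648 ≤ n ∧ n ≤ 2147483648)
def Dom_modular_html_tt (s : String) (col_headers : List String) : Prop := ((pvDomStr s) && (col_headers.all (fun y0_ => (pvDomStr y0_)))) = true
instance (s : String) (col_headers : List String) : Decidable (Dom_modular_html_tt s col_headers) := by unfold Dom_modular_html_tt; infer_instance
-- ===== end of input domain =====

-- B replaces A's precomputed `in_data` bit-pattern table (one toggle loop per column)
-- by a closed-form per-cell bit extraction `(r >> (n-1-col)) & 1`, and builds the HTML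
-- with joined comprehensions instead of string accumulation; same output byte for byte.

-- ===== PORT A =====
-- shared literal strings (the error messages and the expanded f-string templates,
-- byte-identical to what the Python f-strings produce; ph=15.0 and pd=10.0 are the
-- printed float constants w/2 and w/3)
def tt_errLen : String := "ERROR - Invalid data string length. Make sure the amount                 of data string characters is a power of 2."
def tt_errChar : String := "ERROR - data string contains invalid character.                     Make sure the string contains only '0', '1', 'x' or 'X'"
def tt_errHdr : String := "ERROR - Invalid quantity of column headers given. Make sure the                 list contains ONE string for each input"
def tt_style : String := "<style>tr:nth-child(even) {\nbackground-color: #E6E6E6;\n}\n</style>\n"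
def tt_decl : String := "<table style='border-collapse: collapse;'>\n<tr>\n"
def tt_th (label : String) : String := "    <th style='width: 30px; height: 30px; text-align: center;                 padding: 15.0px; border: 2px solid black;'>" ++ label ++ "</th>\n"
def tt_thResult : String := "    <th style='width: 30px; height: 30px; text-align: center; padding:             15.0px; border: 2px solid black; border-left: 4px solid black;'>Result</th>\n"
def tt_td (v : String) : String := "    <td style='width: 30px; height: 30px; text-align: center;                    padding: 10.0px; border: 2px solid black;'>" ++ v ++ "</td>\n"
def tt_tdResult (v : String) : String := "    <td style='width: 30px; height: 30px; text-align: center; padding: 10.0px;                 border: 2px solid black; border-left: 4px solid black;'>" ++ v ++ "</td>\n"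
def tt_foot : String := "</table><p>\n\n</p>"

-- Port of A. int(math.log2(len(s))) is Nat.log2 (exact: the float log2 floors correctly
-- for every length reachable here). Python's `swap = swap/2` stays integer-valued
-- (swap runs through 2^n, 2^(n-1), …), so it is ported on Nat; `f"{flag}"` is
-- PySem.Int.toStr. The early-return character scan is the `any` over s (the returned
-- string does not depend on which character fails).
def modular_html_tt (s : String) (col_headers : List String) : String :=
  let num_inputs := Nat.log2 s.length
  let rows := 2 ^ num_inputs
  if s.length ≠ rows then tt_errLen
  else if s.toList.any (fun c => c != '0' && c != '1' && c != 'X' && c != 'x') then tt_errChar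
  else if col_headers.length ≠ num_inputs then tt_errHdr
  else
    -- Generating input data: fold carrying (swap, in_data)
    let st := (List.range num_inputs).foldl (fun (st : Nat × List (List String)) _ =>
        let swap := st.1 / 2
        let sub := ((List.range rows).foldl (fun (q : Nat × List String) i =>
            let flag := if i % swap = 0 then q.1 ^^^ 1 else q.1
            (flag, q.2 ++ [PySem.Int.toStr (flag : Int)])) (1, [])).2
        (swap, st.2 ++ [sub])) (rows, [])
    let in_data := st.2
    let table := tt_style ++ tt_decl
    let table := col_headers.foldl (fun t label => t ++ tt_th label) table
    let table := table ++ tt_thResult ++ "  </tr>\n"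
    let table := (List.range rows).foldl (fun t r =>
        let t := t ++ "  <tr>\n"
        let t := in_data.foldl (fun t col => t ++ tt_td (col.getD r "")) t
        -- `s[index] if index < len(s) else "&nbsp;"`; col[r] likewise in range (getD)
        let ch := if r < s.length then String.mk [s.toList.getD r ' '] else "&nbsp;"
        t ++ tt_tdResult ch ++ "  </tr>\n") table
    table ++ tt_foot

-- ===== PORT B =====
-- Port of B (Source B): same guards, then head/body built from joined maps; the bit of
-- cell (r, col) is computed directly as (r >> (n-1-col)) & 1 (Nat, both operands ≥ 0).
def modular_html_tt_alt (s : String) (col_headers : List String) : String :=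
  let num_inputs := Nat.log2 s.length
  let rows := 2 ^ num_inputs
  if s.length ≠ rows then tt_errLen
  else if s.toList.any (fun c => !(['0', '1', 'X', 'x'].contains c)) then tt_errChar
  else if col_headers.length ≠ num_inputs then tt_errHdr
  else
    let head := tt_style ++ tt_decl ++ String.join (col_headers.map tt_th) ++ tt_thResult ++ "  </tr>\n"
    let body := String.join ((List.range rows).map (fun r =>
        "  <tr>\n" ++
        String.join ((List.range num_inputs).map (fun col =>
          tt_td (PySem.Int.toStr (((r >>> (num_inputs - 1 - col)) &&& 1 : Nat) : Int)))) ++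
        tt_tdResult (String.mk [s.toList.getD r ' ']) ++ "  </tr>\n"))  -- s[r], r < len(s)
    head ++ body ++ tt_foot

-- ===== PRECONDITION & SPEC =====
-- Pre_ excludes only the empty string, on which A raises ValueError (math.log2(0)).
def Pre_modular_html_tt (s : String) (col_headers : List String) : Prop := s ≠ ""
instance (s : String) (col_headers : List String) : Decidable (Pre_modular_html_tt s col_headers) := by unfold Pre_modular_html_tt; infer_instance
def pvWitness_modular_html_tt : String × List String := ("01", ["A"])
def Spec_modular_html_tt (s : String) (col_headers : List String) (out : String) : Prop := out = modular_html_tt_alt s col_headers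
instance (s : String) (col_headers : List String) (out : String) : Decidable (Spec_modular_html_tt s col_headers out) := by unfold Spec_modular_html_tt; infer_instance

-- ===== CLAIM (what is proved, stated in full; the proofs are below) =====
def Claim_equal_modular_html_tt : Prop := ∀ (s : String) (col_headers : List String), Dom_modular_html_tt s col_headers → Pre_modular_html_tt s col_headers → Spec_modular_html_tt s col_headers (modular_html_tt s col_headers)

-- ===== LEMMAS AND PROOFS =====

theorem sjoin_cons (x : String) (l : List String) : String.join (x :: l) = x ++ String.join l := by
  show List.foldl (·++·) x l = _
  induction l generalizing x with
  | nil => simp [String.join]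
  | cons y ys ih =>
      simp only [String.join, List.foldl_cons] at *
      rw [ih (x++y), show ("":String) ++ y = y from by simp, ih y, String.append_assoc]

theorem fold_join {α : Type} (f : α → String) : ∀ (l : List α) (t : String),
    l.foldl (fun t x => t ++ f x) t = t ++ String.join (l.map f)
  | [], t => by simp [String.join]
  | x :: l, t => by
      simp only [List.foldl_cons, List.map_cons, sjoin_cons, fold_join f l]
      rw [String.append_assoc]

theorem guard_eq (c : Char) :
    (c != '0' && c != '1' && c != 'X' && c != 'x') = !(['0', '1', 'X', 'x'].contains c) := by
  simp only [List.contains_cons, List.contains_nil, Bool.or_false, Bool.not_or, bne,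
    Bool.and_assoc]

-- the toggle flag after processing i equals (i / swap) % 2
theorem flag_step (swap k : Nat) :
    (if k % swap = 0 then (if k = 0 then 1 else (k - 1) / swap % 2) ^^^ 1
     else (if k = 0 then 1 else (k - 1) / swap % 2)) = k / swap % 2 := by
  rcases k with _ | k'
  · simp
  · have hsd : (k' + 1) / swap = k' / swap + if swap ∣ k' + 1 then 1 else 0 := Nat.succ_div
    by_cases hd : swap ∣ k' + 1
    · have hm : (k' + 1) % swap = 0 := Nat.mod_eq_zero_of_dvd hd
      rw [if_pos hm, if_neg (Nat.succ_ne_zero k'), Nat.succ_sub_one, hsd, if_pos hd]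
      rcases Nat.mod_two_eq_zero_or_one (k' / swap) with h | h <;> rw [h] <;> simp <;> omega
    · have hm : ¬ (k' + 1) % swap = 0 := fun h => hd (Nat.dvd_of_mod_eq_zero h)
      rw [if_neg hm, if_neg (Nat.succ_ne_zero k'), Nat.succ_sub_one, hsd, if_neg hd, Nat.add_zero]

-- A's inner column fold computes the closed-form column
theorem sub_fold (swap rows : Nat) :
    ((List.range rows).foldl (fun (q : Nat × List String) i =>
        let flag := if i % swap = 0 then q.1 ^^^ 1 else q.1
        (flag, q.2 ++ [PySem.Int.toStr (flag : Int)])) (1, []))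
      = ((if rows = 0 then 1 else (rows - 1) / swap % 2),
         (List.range rows).map (fun i => PySem.Int.toStr ((i / swap % 2 : Nat) : Int))) := by
  induction rows with
  | zero => simp
  | succ m ih =>
      rw [List.range_succ, List.foldl_append, ih]
      simp only [List.foldl_cons, List.foldl_nil, List.map_append, List.map_cons, List.map_nil]
      have hf := flag_step swap m
      simp only [hf]
      simp


-- A's outer fold produces the closed-form in_data table
theorem indata_fold (n : Nat) : ∀ k, k ≤ n →
    ((List.range k).foldl (fun (st : Nat × List (List String)) _ =>
        let swap := st.1 / 2
        let sub := ((List.range (2 ^ n)).foldl (fun (q : Nat × List String) i =>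
            let flag := if i % swap = 0 then q.1 ^^^ 1 else q.1
            (flag, q.2 ++ [PySem.Int.toStr (flag : Int)])) (1, [])).2
        (swap, st.2 ++ [sub])) (2 ^ n, []))
      = (2 ^ (n - k), (List.range k).map (fun col =>
          (List.range (2 ^ n)).map (fun i =>
            PySem.Int.toStr ((i / 2 ^ (n - (col + 1)) % 2 : Nat) : Int))))
  | 0, _ => by simp
  | k + 1, hk => by
      rw [List.range_succ, List.foldl_append, indata_fold n k (by omega)]
      have hsw : 2 ^ (n - k) / 2 = 2 ^ (n - (k + 1)) := by
        rw [show n - k = (n - (k + 1)) + 1 by omega, pow_succ]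
        omega
      simp only [List.foldl_cons, List.foldl_nil, hsw, sub_fold, List.map_append,
        List.map_cons, List.map_nil]

-- one data cell of row r, column col
theorem cell_val (n rows r : Nat) (hr : r < rows) (col : Nat) :
    ((List.range rows).map (fun i =>
        PySem.Int.toStr ((i / 2 ^ (n - (col + 1)) % 2 : Nat) : Int))).getD r ""
      = PySem.Int.toStr ((r >>> (n - 1 - col) &&& 1 : Nat) : Int) := by
  rw [List.getD_eq_getElem?_getD, List.getElem?_map, List.getElem?_range hr]
  simp [Nat.shiftRight_eq_div_pow, Nat.and_one_is_mod, Nat.sub_sub, Nat.add_comm]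

-- ===== VERDICT (by name: the statement is the Claim_ definition above) =====
theorem modular_html_tt_spec : Claim_equal_modular_html_tt := by
  intro s ch _ _
  show modular_html_tt s ch = modular_html_tt_alt s ch
  unfold modular_html_tt modular_html_tt_alt
  have hg : (fun c : Char => !(['0', '1', 'X', 'x'].contains c))
      = (fun c : Char => c != '0' && c != '1' && c != 'X' && c != 'x') :=
    funext fun c => (guard_eq c).symm
  simp only [hg]
  split_ifs with h1 h2 h3
  · rfl
  · rfl
  · rfl
  · -- main branch
    have hlen : s.length = 2 ^ Nat.log2 s.length := by omega
    rw [indata_fold (Nat.log2 s.length) (Nat.log2 s.length) le_rfl]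
    rw [fold_join tt_th ch (tt_style ++ tt_decl)]
    rw [PySem.List.foldl_congr_mem (g := fun (t : String) r =>
          t ++ ("  <tr>\n" ++
            String.join ((List.range (Nat.log2 s.length)).map (fun col =>
              tt_td (PySem.Int.toStr ((r >>> (Nat.log2 s.length - 1 - col) &&& 1 : Nat) : Int)))) ++
            tt_tdResult (String.mk [s.toList.getD r ' ']) ++ "  </tr>\n"))
        (h := ?_)]
    · rw [fold_join]
    · intro t r hr
      have hrlt : r < 2 ^ Nat.log2 s.length := List.mem_range.mp hr
      rw [List.foldl_map]
      have hval : ∀ col : Nat,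
          ((List.range (2 ^ Nat.log2 s.length)).map (fun i =>
              PySem.Int.toStr ((i / 2 ^ (Nat.log2 s.length - (col + 1)) % 2 : Nat) : Int))).getD r ""
            = PySem.Int.toStr ((r >>> (Nat.log2 s.length - 1 - col) &&& 1 : Nat) : Int) :=
        fun col => cell_val _ _ _ hrlt col
      simp only [hval]
      rw [fold_join]
      rw [if_pos (by omega : r < s.length)]
      simp only [String.append_assoc]
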